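-- pv_equiv track=rewrite | github.com/michael-lesirge/tic-tac-toe | src/tic_tac_toe.py | is_same_arrangement
-- ===== SOURCE A (Python) =====
-- def is_same_arrangement(a, b):
--     if len(a) != len(b): return False
--
--     unique_a = set(a)
--     unique_b = set(b)
--
--     if len(unique_a) != len(unique_b): return False
--
--     a_arrangement = set(tuple(i for i, elem in enumerate(a) if elem == unique_item) for unique_item in unique_a)
--     b_arrangement = set(tuple(i for i, elem in enumerate(b) if elem == unique_item) for unique_item in unique_b)
--
--     return a_arrangement == b_arrangement
-- ===== SOURCE B (Python) =====
-- def is_same_arrangement(a, b):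
--     # Faster single pass: label each position by the first-occurrence index of its
--     # element; the groupings agree iff the label sequences agree position by position.
--     if len(a) != len(b):
--         return False
--     first_a = {}
--     first_b = {}
--     for i, (x, y) in enumerate(zip(a, b)):
--         if first_a.setdefault(x, i) != first_b.setdefault(y, i):
--             return False
--     return True
-- ===== Notes on version B (the rewrite author's own statement) =====
-- stated objective: faster
-- what changed: Instead of building, for every unique element of each list, the set of its occurrence indices and comparing the two sets of index tuples, B makes one pass over zip(a, b), labelling each position with the first-occurrence index of its element via dict.setdefault, and returns False at the first position where the two labels disagree.
import Mathlib
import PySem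

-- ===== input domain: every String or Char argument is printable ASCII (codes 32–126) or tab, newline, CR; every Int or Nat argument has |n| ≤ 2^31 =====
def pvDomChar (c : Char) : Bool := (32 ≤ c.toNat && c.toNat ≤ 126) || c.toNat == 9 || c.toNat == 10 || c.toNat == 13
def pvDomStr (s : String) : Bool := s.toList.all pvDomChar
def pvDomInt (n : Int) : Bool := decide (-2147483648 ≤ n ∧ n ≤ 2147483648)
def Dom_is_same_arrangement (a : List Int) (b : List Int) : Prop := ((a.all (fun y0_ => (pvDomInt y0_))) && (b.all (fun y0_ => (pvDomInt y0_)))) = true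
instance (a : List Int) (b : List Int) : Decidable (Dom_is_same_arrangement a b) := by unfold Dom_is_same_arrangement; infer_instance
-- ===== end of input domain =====

-- B replaces A's per-unique-element index-group sets by a single pass that labels each
-- position with the first-occurrence index of its element (dict setdefault) — simpler and faster.

-- ===== PORT A =====
-- tuple(i for i, elem in enumerate(l) if elem == u)
def pvGroup (l : List Int) (u : Int) : List Int :=
  ((PySem.List.enumerate l).filter (fun p => p.2 == u)).map (fun p => p.1)

def is_same_arrangement (a : List Int) (b : List Int) : Bool :=
  if PySem.List.len a != PySem.List.len b then false
  else
    let unique_a : PySem.Set Int := PySem.Set.ofList a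
    let unique_b : PySem.Set Int := PySem.Set.ofList b
    if PySem.Set.len unique_a != PySem.Set.len unique_b then false
    else
      let a_arrangement : PySem.Set (List Int) :=
        PySem.Set.ofList (unique_a.map (fun u => pvGroup a u))
      let b_arrangement : PySem.Set (List Int) :=
        PySem.Set.ofList (unique_b.map (fun u => pvGroup b u))
      PySem.Set.equal a_arrangement b_arrangement

-- ===== PORT B =====
-- for i, (x, y) in enumerate(zip(a, b)): if first_a.setdefault(x, i) != first_b.setdefault(y, i): return False
def pvBLoop (fa fb : PySem.Dict Int Int) (i : Int) : List (Int × Int) → Bool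
  | [] => true
  | (x, y) :: rest =>
    if (fa.get? x).getD i != (fb.get? y).getD i then false
    else pvBLoop (fa.setdefault x i) (fb.setdefault y i) (i + 1) rest

def is_same_arrangement_alt (a : List Int) (b : List Int) : Bool :=
  if PySem.List.len a != PySem.List.len b then false
  else pvBLoop PySem.Dict.empty PySem.Dict.empty 0 (a.zip b)

-- ===== PRECONDITION & SPEC =====
def Spec_is_same_arrangement (a : List Int) (b : List Int) (out : Bool) : Prop := out = is_same_arrangement_alt a b
instance (a : List Int) (b : List Int) (out : Bool) : Decidable (Spec_is_same_arrangement a b out) := by unfold Spec_is_same_arrangement; infer_instance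

-- ===== CLAIM (what is proved, stated in full; the proofs are below) =====
def Claim_equal_is_same_arrangement : Prop := ∀ (a : List Int) (b : List Int), Dom_is_same_arrangement a b → Spec_is_same_arrangement a b (is_same_arrangement a b)

-- ===== LEMMAS AND PROOFS =====

-- first-occurrence index is minimal
theorem pv_idxOf_le (l : List Int) (x : Int) (k : Nat) (h : k < l.length) (hx : l[k] = x) :
    l.idxOf x ≤ k := by
  by_contra hc
  have hc' : k < List.findIdx (· == x) l := by
    simpa [List.idxOf] using Nat.lt_of_not_le hc
  have := List.not_of_lt_findIdx hc'
  simp at this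
  exact this hx

-- the dict invariant maintained by B's loop
def pvInv (d : PySem.Dict Int Int) (p : List Int) : Prop :=
  ∀ z : Int, d.get? z = if z ∈ p then some ((p.idxOf z : Int)) else none

theorem pvInv_empty : pvInv PySem.Dict.empty [] := by
  intro z; simp [PySem.Dict.get?_empty]

theorem pvInv_step (d : PySem.Dict Int Int) (p : List Int) (x : Int) (h : pvInv d p) :
    pvInv (d.setdefault x (p.length : Int)) (p ++ [x]) := by
  intro z
  have hc : d.contains x = decide (x ∈ p) := by
    rw [PySem.Dict.contains_eq_isSome_get?, h x]
    by_cases hx : x ∈ p <;> simp [hx]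
  by_cases hx : x ∈ p
  · have hd : d.setdefault x (p.length : Int) = d := by
      simp [PySem.Dict.setdefault, hc, hx]
    rw [hd, h z]
    by_cases hz : z ∈ p
    · simp [hz, List.idxOf_append]
    · by_cases hzx : z = x
      · subst hzx; exact absurd hx hz
      · simp [hz, hzx]
  · have hd : d.setdefault x (p.length : Int) = d.insert x (p.length : Int) := by
      simp [PySem.Dict.setdefault, hc, hx]
      rw [← PySem.Dict.items_insert_of_not_contains d ((p.length : Int)) (by simp [hc, hx])]
    rw [hd, PySem.Dict.get?_insert]
    by_cases hzx : z = x
    · subst hzx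
      simp [List.idxOf_append, hx]
    · rw [if_neg hzx, h z]
      by_cases hz : z ∈ p
      · simp [hz, List.idxOf_append]
      · simp [hz, hzx]

-- value read by setdefault = first-occurrence index in the whole list
theorem pv_read (d : PySem.Dict Int Int) (p : List Int) (x : Int) (rest : List Int)
    (h : pvInv d p) :
    (d.get? x).getD (p.length : Int) = ((p ++ x :: rest).idxOf x : Int) := by
  rw [h x, List.idxOf_append]
  by_cases hx : x ∈ p
  · simp [hx]
  · simp [hx]

theorem pvBLoop_iff (xs : List (Int × Int)) :
    ∀ (pa pb : List Int) (fa fb : PySem.Dict Int Int), pb.length = pa.length →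
    pvInv fa pa → pvInv fb pb →
    (pvBLoop fa fb (pa.length : Int) xs = true ↔
      ∀ k : Nat, ∀ h : k < xs.length,
        (pa ++ xs.map Prod.fst).idxOf (xs[k].1) = (pb ++ xs.map Prod.snd).idxOf (xs[k].2)) := by
  induction xs with
  | nil => intro pa pb fa fb hl ha hb; simp [pvBLoop]
  | cons hd rest ih =>
    intro pa pb fa fb hl ha hb
    obtain ⟨x, y⟩ := hd
    have hva := pv_read fa pa x (rest.map Prod.fst) ha
    have hvb : (fb.get? y).getD (pa.length : Int) = ((pb ++ y :: rest.map Prod.snd).idxOf y : Int) := by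
      rw [show ((pa.length : Int)) = ((pb.length : Int)) by rw [hl]]
      exact pv_read fb pb y (rest.map Prod.snd) hb
    rw [pvBLoop]
    by_cases heq : ((pa ++ x :: rest.map Prod.fst).idxOf x) = ((pb ++ y :: rest.map Prod.snd).idxOf y)
    · have hif : ¬ ((fa.get? x).getD (pa.length:Int) != (fb.get? y).getD (pa.length:Int)) = true := by
        simp [hva, hvb, heq]
      rw [if_neg hif]
      have ihs := ih (pa ++ [x]) (pb ++ [y])
        (fa.setdefault x (pa.length : Int)) (fb.setdefault y (pa.length : Int))
        (by simp [hl])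
        (pvInv_step fa pa x ha)
        (by rw [show ((pa.length : Int)) = ((pb.length : Int)) by rw [hl]]
            exact pvInv_step fb pb y hb)
      have hcast : ((pa ++ [x]).length : Int) = (pa.length : Int) + 1 := by
        simp
      rw [hcast] at ihs
      rw [ihs]
      constructor
      · intro hR k hk
        match k with
        | 0 => simpa using heq
        | (k+1) =>
          have := hR k (by simpa using hk)
          simpa [List.append_assoc] using this
      · intro hR k hk
        have := hR (k+1) (by simpa using hk)
        simpa [List.append_assoc] using this
    · have hif : ((fa.get? x).getD (pa.length:Int) != (fb.get? y).getD (pa.length:Int)) = true := by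
        simp [hva, hvb]
        exact_mod_cast heq
      rw [if_pos hif]
      simp only [Bool.false_eq_true, false_iff]
      intro hR
      exact heq (by simpa using hR 0 (by simp))

-- B's characterization: equal first-occurrence labels at every position
theorem alt_iff (a b : List Int) (hlen : a.length = b.length) :
    (is_same_arrangement_alt a b = true ↔
      ∀ k : Nat, ∀ h : k < a.length, ∀ h' : k < b.length,
        a.idxOf a[k] = b.idxOf b[k]) := by
  unfold is_same_arrangement_alt
  rw [if_neg (by simp [PySem.List.len_eq, hlen])]
  have h0 := pvBLoop_iff (a.zip b) [] [] PySem.Dict.empty PySem.Dict.empty rfl pvInv_empty pvInv_empty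
  simp only [List.length_nil, Nat.cast_zero, List.nil_append] at h0
  rw [h0]
  constructor
  · intro hR k hk hk'
    have := hR k (by simp [List.length_zip]; omega)
    simpa [List.map_fst_zip (le_of_eq hlen), List.map_snd_zip (ge_of_eq hlen), List.getElem_zip] using this
  · intro hP k hk
    have hk1 : k < a.length := by simp [List.length_zip] at hk; omega
    have hk2 : k < b.length := by omega
    have := hP k hk1 hk2
    simpa [List.map_fst_zip (le_of_eq hlen), List.map_snd_zip (ge_of_eq hlen), List.getElem_zip] using this

-- membership in an index group
theorem mem_pvGroup (l : List Int) (u : Int) (j : Int) :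
    j ∈ pvGroup l u ↔ ∃ k : Nat, ∃ h : k < l.length, j = (k : Int) ∧ l[k] = u := by
  simp [pvGroup, List.mem_filter, PySem.List.mem_enumerate_iff]

-- groups built from pointwise-equivalent lists are equal (as lists)
theorem pvGroup_congr (a : List Int) : ∀ (b : List Int) (s u v : Int),
    a.length = b.length →
    (∀ k : Nat, ∀ h : k < a.length, ∀ h' : k < b.length, (a[k] = u ↔ b[k] = v)) →
    ((PySem.List.enumerate a s).filter (fun p => p.2 == u)).map (fun p => p.1)
      = ((PySem.List.enumerate b s).filter (fun p => p.2 == v)).map (fun p => p.1) := by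
  induction a with
  | nil => intro b s u v hl _; cases b with
    | nil => rfl
    | cons c cs => simp at hl
  | cons x xs ih =>
    intro b s u v hl hiff
    cases b with
    | nil => simp at hl
    | cons y ys =>
      have h0 : (x = u ↔ y = v) := by simpa using hiff 0 (by simp) (by simp)
      have htl := ih ys (s+1) u v (by simpa using hl)
        (fun k hk hk' => by simpa using hiff (k+1) (by simpa using hk) (by simpa using hk'))
      rw [PySem.List.enumerate_cons, PySem.List.enumerate_cons]
      by_cases hx : x = u
      · rw [List.filter_cons_of_pos (by simpa using hx), List.filter_cons_of_pos (by simpa using h0.mp hx)]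
        simp only [List.map_cons, htl]
      · rw [List.filter_cons_of_neg (by simpa using hx), List.filter_cons_of_neg (by simpa using (fun hy => hx (h0.mpr hy)))]
        exact htl

-- the label condition transfers equality of elements between the two lists
theorem pv_transfer (a b : List Int) (hlen : a.length = b.length)
    (hP : ∀ k : Nat, ∀ h : k < a.length, ∀ h' : k < b.length, a.idxOf a[k] = b.idxOf b[k])
    (i j : Nat) (hi : i < a.length) (hj : j < a.length) :
    (a[i] = a[j] ↔ b[i]'(hlen ▸ hi) = b[j]'(hlen ▸ hj)) := by
  have hi' : i < b.length := hlen ▸ hi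
  have hj' : j < b.length := hlen ▸ hj
  constructor
  · intro h
    have h1 : b.idxOf b[i] = b.idxOf b[j] := by
      rw [← hP i hi hi', ← hP j hj hj', h]
    have hm : b.idxOf b[i] < b.length := List.idxOf_lt_length_iff.mpr (List.getElem_mem hi')
    have e1 : b[b.idxOf b[i]]'hm = b[i] := List.getElem_idxOf hm
    have e2 : b[b.idxOf b[j]]'(h1 ▸ hm) = b[j] := List.getElem_idxOf (h1 ▸ hm)
    rw [← e1, ← e2]
    congr 1
  · intro h
    have h1 : a.idxOf a[i] = a.idxOf a[j] := by
      rw [hP i hi hi', hP j hj hj', h]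
    have hm : a.idxOf a[i] < a.length := List.idxOf_lt_length_iff.mpr (List.getElem_mem hi)
    have e1 : a[a.idxOf a[i]]'hm = a[i] := List.getElem_idxOf hm
    have e2 : a[a.idxOf a[j]]'(h1 ▸ hm) = a[j] := List.getElem_idxOf (h1 ▸ hm)
    rw [← e1, ← e2]
    congr 1


-- set-of-groups equality forces equal labels
theorem setEq_to_P (a b : List Int) (_hlen : a.length = b.length)
    (hS : ∀ g : List Int,
      (g ∈ PySem.Set.ofList ((PySem.Set.ofList a).map (fun u => pvGroup a u)) ↔
       g ∈ PySem.Set.ofList ((PySem.Set.ofList b).map (fun u => pvGroup b u)))) :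
    ∀ k : Nat, ∀ h : k < a.length, ∀ h' : k < b.length, a.idxOf a[k] = b.idxOf b[k] := by
  intro k hk hk'
  have hmemA : pvGroup a a[k] ∈ PySem.Set.ofList ((PySem.Set.ofList a).map (fun u => pvGroup a u)) := by
    rw [PySem.Set.mem_ofList]
    exact List.mem_map_of_mem ((PySem.Set.mem_ofList _ _).mpr (List.getElem_mem hk))
  have hmemB := (hS _).mp hmemA
  rw [PySem.Set.mem_ofList] at hmemB
  obtain ⟨v, hv, hgv0⟩ := List.mem_map.mp hmemB
  have hgv1 : pvGroup a a[k] = pvGroup b v := hgv0.symm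
  have hkin : ((k : Int)) ∈ pvGroup a a[k] := (mem_pvGroup a a[k] k).mpr ⟨k, hk, rfl, rfl⟩
  have hkinb : ((k : Int)) ∈ pvGroup b v := hgv1 ▸ hkin
  obtain ⟨k2, hk2, hc, hbk2⟩ := (mem_pvGroup b v k).mp hkinb
  have hk2e : k = k2 := by exact_mod_cast hc
  have hbv : b[k] = v := by rw [← hbk2]; congr 1
  have hgv : pvGroup a a[k] = pvGroup b b[k] := by rw [hgv1, hbv]
  have hia : a.idxOf a[k] < a.length := List.idxOf_lt_length_iff.mpr (List.getElem_mem hk)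
  have hib : b.idxOf b[k] < b.length := List.idxOf_lt_length_iff.mpr (List.getElem_mem hk')
  have h1 : b.idxOf b[k] ≤ a.idxOf a[k] := by
    have : ((a.idxOf a[k] : Int)) ∈ pvGroup a a[k] :=
      (mem_pvGroup a a[k] _).mpr ⟨_, hia, rfl, List.getElem_idxOf hia⟩
    rw [hgv] at this
    obtain ⟨m, hm, hc2, hbm⟩ := (mem_pvGroup b b[k] _).mp this
    have : a.idxOf a[k] = m := by exact_mod_cast hc2
    rw [this]
    exact pv_idxOf_le b b[k] m hm hbm
  have h2 : a.idxOf a[k] ≤ b.idxOf b[k] := by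
    have : ((b.idxOf b[k] : Int)) ∈ pvGroup b b[k] :=
      (mem_pvGroup b b[k] _).mpr ⟨_, hib, rfl, List.getElem_idxOf hib⟩
    rw [← hgv] at this
    obtain ⟨m, hm, hc2, ham⟩ := (mem_pvGroup a a[k] _).mp this
    have : b.idxOf b[k] = m := by exact_mod_cast hc2
    rw [this]
    exact pv_idxOf_le a a[k] m hm ham
  omega

-- equal labels force set-of-groups equality
theorem P_to_setEq (a b : List Int) (hlen : a.length = b.length)
    (hP : ∀ k : Nat, ∀ h : k < a.length, ∀ h' : k < b.length, a.idxOf a[k] = b.idxOf b[k]) :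
    ∀ g : List Int,
      (g ∈ PySem.Set.ofList ((PySem.Set.ofList a).map (fun u => pvGroup a u)) ↔
       g ∈ PySem.Set.ofList ((PySem.Set.ofList b).map (fun u => pvGroup b u))) := by
  intro g
  rw [PySem.Set.mem_ofList, PySem.Set.mem_ofList]
  constructor
  · intro hg
    obtain ⟨u, hu, hgu⟩ := List.mem_map.mp hg
    obtain ⟨i, hi, hai⟩ := List.mem_iff_getElem.mp ((PySem.Set.mem_ofList _ _).mp hu)
    have hi' : i < b.length := hlen ▸ hi
    have hgrp : pvGroup a u = pvGroup b (b[i]'hi') := by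
      unfold pvGroup
      exact pvGroup_congr a b 0 u (b[i]'hi') hlen
        (fun k hk hk' => by
          rw [← hai]
          exact pv_transfer a b hlen hP k i hk hi)
    apply List.mem_map.mpr
    exact ⟨b[i]'hi', (PySem.Set.mem_ofList _ _).mpr (List.getElem_mem hi'), by rw [← hgu, hgrp]⟩
  · intro hg
    obtain ⟨v, hv, hgv⟩ := List.mem_map.mp hg
    obtain ⟨i, hi, hbi⟩ := List.mem_iff_getElem.mp ((PySem.Set.mem_ofList _ _).mp hv)
    have hi' : i < a.length := hlen ▸ hi
    have hgrp : pvGroup a (a[i]'hi') = pvGroup b v := by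
      unfold pvGroup
      exact pvGroup_congr a b 0 (a[i]'hi') v hlen
        (fun k hk hk' => by
          rw [← hbi]
          exact pv_transfer a b hlen hP k i hk hi')
    apply List.mem_map.mpr
    exact ⟨a[i]'hi', (PySem.Set.mem_ofList _ _).mpr (List.getElem_mem hi'), by rw [← hgv, hgrp]⟩

-- the family of groups has as many members as there are distinct values
theorem arr_length (a : List Int) :
    (PySem.Set.ofList ((PySem.Set.ofList a).map (fun u => pvGroup a u))).length
      = (PySem.Set.ofList a).length := by
  have hinj : ∀ u ∈ PySem.Set.ofList a, ∀ v ∈ PySem.Set.ofList a,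
      pvGroup a u = pvGroup a v → u = v := by
    intro u hu v hv huv
    obtain ⟨i, hi, hai⟩ := List.mem_iff_getElem.mp ((PySem.Set.mem_ofList _ _).mp hu)
    have : ((i : Int)) ∈ pvGroup a u := (mem_pvGroup a u i).mpr ⟨i, hi, rfl, hai⟩
    rw [huv] at this
    obtain ⟨m, hm, hc, ham⟩ := (mem_pvGroup a v i).mp this
    have him : i = m := by exact_mod_cast hc
    subst him
    rw [← hai, ham]
  have hnd : ((PySem.Set.ofList a).map (fun u => pvGroup a u)).Nodup :=
    (PySem.Set.nodup_ofList a).map_on hinj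
  rw [PySem.Set.ofList_eq_self_of_nodup _ hnd, List.length_map]

-- ===== VERDICT (by name: the statement is the Claim_ definition above) =====
theorem is_same_arrangement_spec : Claim_equal_is_same_arrangement := by
  intro a b _
  unfold Spec_is_same_arrangement
  by_cases hlen : a.length = b.length
  · by_cases hP : ∀ k : Nat, ∀ h : k < a.length, ∀ h' : k < b.length,
        a.idxOf a[k] = b.idxOf b[k]
    · have hB : is_same_arrangement_alt a b = true := (alt_iff a b hlen).mpr hP
      have hS := P_to_setEq a b hlen hP
      have hSeq : PySem.Set.equal
          (PySem.Set.ofList ((PySem.Set.ofList a).map (fun u => pvGroup a u)))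
          (PySem.Set.ofList ((PySem.Set.ofList b).map (fun u => pvGroup b u))) = true :=
        (PySem.Set.equal_iff _ _).mpr hS
      have hlen2 : (PySem.Set.ofList a).length = (PySem.Set.ofList b).length := by
        have hperm := (List.perm_ext_iff_of_nodup (PySem.Set.nodup_ofList _)
          (PySem.Set.nodup_ofList _)).mpr hS
        have := hperm.length_eq
        rwa [arr_length a, arr_length b] at this
      unfold is_same_arrangement
      rw [if_neg (by simp [PySem.List.len_eq, hlen])]
      rw [if_neg (by simp [PySem.Set.len, hlen2])]
      rw [hB, hSeq]
    · have hB : is_same_arrangement_alt a b = false := by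
        cases hBB : is_same_arrangement_alt a b with
        | false => rfl
        | true => exact absurd ((alt_iff a b hlen).mp hBB) hP
      unfold is_same_arrangement
      rw [if_neg (by simp [PySem.List.len_eq, hlen])]
      rw [hB]
      by_cases hcnt : (PySem.Set.ofList a).length = (PySem.Set.ofList b).length
      · rw [if_neg (by simp [PySem.Set.len, hcnt])]
        cases hSeq : PySem.Set.equal
            (PySem.Set.ofList ((PySem.Set.ofList a).map (fun u => pvGroup a u)))
            (PySem.Set.ofList ((PySem.Set.ofList b).map (fun u => pvGroup b u))) with
        | false => rfl
        | true =>
          exact absurd (setEq_to_P a b hlen ((PySem.Set.equal_iff _ _).mp hSeq)) hP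
      · rw [if_pos (by simp [PySem.Set.len]; exact_mod_cast hcnt)]
  · unfold is_same_arrangement is_same_arrangement_alt
    rw [if_pos (by simp [PySem.List.len_eq]; exact_mod_cast hlen),
        if_pos (by simp [PySem.List.len_eq]; exact_mod_cast hlen)]
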